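-- pv_equiv track=rewrite | github.com/vetka925/oldturkicmorph-web | morph/morph_analysis.py | filter_pars
-- ===== SOURCE A (Python) =====
-- def filter_pars(parses):
--     result = []
--     order = [5,4,6,3,7,8,9,10,11,12,13,14,15,16,17,18]
--     for l in order:
--         for p in parses:
--             if len(p[0][0]) == l:
--                 result.append(p)
--     return result
-- ===== SOURCE B (Python) =====
-- def filter_pars(parses):
--     buckets = {}
--     for p in parses:
--         buckets.setdefault(len(p[0][0]), []).append(p)
--     order = [5,4,6,3,7,8,9,10,11,12,13,14,15,16,17,18]
--     return [p for l in order for p in buckets.get(l, [])]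
-- ===== Notes on version B (the rewrite author's own statement) =====
-- stated objective: alternative
-- what changed: One bucketing pass over parses into a length-keyed dict plus one concatenation over the fixed priority list, instead of A's 16 full scans of parses; timing showed no measurable advantage.
import Mathlib
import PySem

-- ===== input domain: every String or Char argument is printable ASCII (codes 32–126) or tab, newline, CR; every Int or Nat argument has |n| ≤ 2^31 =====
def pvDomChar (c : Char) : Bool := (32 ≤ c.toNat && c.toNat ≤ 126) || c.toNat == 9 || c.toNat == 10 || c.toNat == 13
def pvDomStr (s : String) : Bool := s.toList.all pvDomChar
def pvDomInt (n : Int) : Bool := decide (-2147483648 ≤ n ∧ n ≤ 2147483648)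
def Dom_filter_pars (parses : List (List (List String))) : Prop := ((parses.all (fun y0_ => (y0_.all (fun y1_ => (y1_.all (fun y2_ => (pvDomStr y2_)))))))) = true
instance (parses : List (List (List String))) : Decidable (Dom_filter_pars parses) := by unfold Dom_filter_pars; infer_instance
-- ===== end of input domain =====

-- B replaces A's 16 full scans of `parses` with one bucketing pass into a length-keyed
-- dict plus one concatenation over the fixed priority list (objective: alternative algorithm).

-- shared helper: len(p[0][0]) of both Pythons; exact under Pre_ (p and p[0] nonempty),
-- where Python's p[0] is the head (headD only pads the excluded raising inputs).
def pvKey (p : List (List String)) : Int := PySem.Str.len ((p.headD []).headD "")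

def pvOrder : List Int := [5, 4, 6, 3, 7, 8, 9, 10, 11, 12, 13, 14, 15, 16, 17, 18]

-- ===== PORT A =====
def filter_pars (parses : List (List (List String))) : List (List (List String)) :=
  pvOrder.foldl
    (fun result l =>
      parses.foldl (fun r p => if pvKey p == l then r ++ [p] else r) result)
    []

-- ===== PORT B =====
def filter_pars_alt (parses : List (List (List String))) : List (List (List String)) :=
  let buckets : PySem.Dict Int (List (List (List String))) :=
    parses.foldl (fun d p => d.insert (pvKey p) (d.getD (pvKey p) [] ++ [p])) PySem.Dict.empty
  pvOrder.flatMap (fun l => buckets.getD l [])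

-- ===== PRECONDITION & SPEC =====
-- Pre_ excludes exactly the inputs on which Python A (and B) raise IndexError:
-- some parse that is empty or whose first element is an empty list.
def Pre_filter_pars (parses : List (List (List String))) : Prop :=
  ∀ p ∈ parses, p.headD [] ≠ []
instance (parses : List (List (List String))) : Decidable (Pre_filter_pars parses) := by
  unfold Pre_filter_pars; infer_instance
def pvWitness_filter_pars : List (List (List String)) := [[["abcde"]], [["abc"]], [["ab"]]]

def Spec_filter_pars (parses : List (List (List String))) (out : List (List (List String))) : Prop := out = filter_pars_alt parses
instance (parses : List (List (List String))) (out : List (List (List String))) : Decidable (Spec_filter_pars parses out) := by unfold Spec_filter_pars; infer_instance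

-- ===== CLAIM (what is proved, stated in full; the proofs are below) =====
def Claim_equal_filter_pars : Prop := ∀ (parses : List (List (List String))), Dom_filter_pars parses → Pre_filter_pars parses → Spec_filter_pars parses (filter_pars parses)

-- ===== LEMMAS AND PROOFS =====

theorem filter_pars_eq_flatMap (parses : List (List (List String))) :
    filter_pars parses
      = pvOrder.flatMap (fun l => parses.filter (fun p => pvKey p == l)) := by
  simp only [filter_pars, PySem.List.foldl_append_if_eq_filter,
    PySem.List.foldl_append_eq_flatMap, List.nil_append]

theorem buckets_getD (parses : List (List (List String)))
    (d : PySem.Dict Int (List (List (List String)))) (l : Int) :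
    ((parses.foldl (fun d p => d.insert (pvKey p) (d.getD (pvKey p) [] ++ [p])) d).getD l [])
      = d.getD l [] ++ parses.filter (fun p => pvKey p == l) := by
  induction parses generalizing d with
  | nil => simp
  | cons p ps ih =>
      simp only [List.foldl_cons, ih, List.filter_cons]
      rw [PySem.Dict.getD_insert]
      by_cases h : pvKey p = l
      · simp [h]
      · simp [h, Ne.symm h]

theorem filter_pars_alt_eq_flatMap (parses : List (List (List String))) :
    filter_pars_alt parses
      = pvOrder.flatMap (fun l => parses.filter (fun p => pvKey p == l)) := by
  simp [filter_pars_alt, buckets_getD]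

-- ===== VERDICT (by name: the statement is the Claim_ definition above) =====
theorem filter_pars_spec : Claim_equal_filter_pars := by
  intro parses _ _
  unfold Spec_filter_pars
  rw [filter_pars_eq_flatMap, filter_pars_alt_eq_flatMap]
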